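-- pv_equiv track=rewrite | github.com/KTB-CodingTest-2/ktb-algorithm-solutions | lily/week_1/boj_17609.py | check_palindrome_or_not
-- ===== SOURCE A (Python) =====
-- def is_palindrome(s, left, right):
--     while left < right:
--         if s[left] != s[right]:
--             return False
--         left += 1
--         right -= 1
--     return True
--
-- def check_palindrome_or_not(input_str):
--     start_idx = 0
--     end_idx = len(input_str) - 1
--
--     while start_idx < end_idx:
--         if input_str[start_idx] == input_str[end_idx]:
--             start_idx += 1
--             end_idx -= 1
--             continue
--
--         # 두 경우 중에 하나라도 회문이면 유사 회문
--         if is_palindrome(input_str, start_idx + 1, end_idx) or is_palindrome(input_str, start_idx, end_idx - 1):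
--             return 1
--         return 2
--
--     return 0
-- ===== SOURCE B (Python) =====
-- def check_palindrome_or_not(input_str):
--     if input_str == input_str[::-1]:
--         return 0
--     for k in range(len(input_str)):
--         t = input_str[:k] + input_str[k + 1:]
--         if t == t[::-1]:
--             return 1
--     return 2
-- ===== Notes on version B (the rewrite author's own statement) =====
-- stated objective: simpler
-- what changed: B replaces A's two-pointer mismatch scan with skip-left/skip-right candidate tests by an exhaustive search: it tries deleting every single position k and checks the remainder by reverse-and-compare, returning 1 if any deletion yields a palindrome.
import Mathlib
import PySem

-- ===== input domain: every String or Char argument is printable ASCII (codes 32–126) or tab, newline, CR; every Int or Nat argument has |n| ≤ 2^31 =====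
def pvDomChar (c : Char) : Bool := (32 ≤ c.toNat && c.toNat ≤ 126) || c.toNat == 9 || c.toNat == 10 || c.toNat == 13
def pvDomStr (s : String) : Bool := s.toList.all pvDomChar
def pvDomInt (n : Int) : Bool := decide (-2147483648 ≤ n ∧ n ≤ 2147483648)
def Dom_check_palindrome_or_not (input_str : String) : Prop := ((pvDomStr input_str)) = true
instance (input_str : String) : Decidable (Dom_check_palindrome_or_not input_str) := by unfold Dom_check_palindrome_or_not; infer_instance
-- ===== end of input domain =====

-- B replaces A's two-pointer mismatch scan plus skip-left/skip-right test by an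
-- exhaustive search over all single-character deletions, each checked by
-- reverse-and-compare; objective: simpler (B is not faster).


-- ===== PORT A =====
-- is_palindrome(s, left, right): two-pointer scan.  The `none` arm of pyGet? is Python's
-- IndexError; it is unreachable for the in-range calls the entry function makes.
def pvIsPalAux (s : List Char) (left right : Int) : Bool :=
  if left < right then
    match PySem.List.pyGet? s left, PySem.List.pyGet? s right with
    | some a, some b => if a ≠ b then false else pvIsPalAux s (left + 1) (right - 1)
    | _, _ => false
  else true
termination_by (right - left).toNat
decreasing_by omega

-- the while-loop of check_palindrome_or_not over (start_idx, end_idx); `none` arm unreachable likewise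
def pvCheckLoop (s : List Char) (i j : Int) : Int :=
  if i < j then
    match PySem.List.pyGet? s i, PySem.List.pyGet? s j with
    | some a, some b =>
      if a = b then pvCheckLoop s (i + 1) (j - 1)
      else if pvIsPalAux s (i + 1) j || pvIsPalAux s i (j - 1) then 1 else 2
    | _, _ => 0
  else 0
termination_by (j - i).toNat
decreasing_by omega

def check_palindrome_or_not (input_str : String) : Int :=
  pvCheckLoop input_str.toList 0 (PySem.Str.len input_str - 1)

-- ===== PORT B =====
-- the for-loop "for k in range(n): t = s[:k] + s[k+1:]; if t == t[::-1]: return 1" / "return 2"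
def pvTryDeletions (l : List Char) (ks : List Int) : Int :=
  match ks with
  | [] => 2
  | k :: rest =>
      let t := PySem.List.slice l none (some k) ++ PySem.List.slice l (some (k + 1)) none
      if t = t.reverse then 1 else pvTryDeletions l rest

-- string equality in Python is list-of-chars equality; t == t[::-1] is t = t.reverse
def check_palindrome_or_not_alt (input_str : String) : Int :=
  let l := input_str.toList
  if l = l.reverse then 0
  else pvTryDeletions l (PySem.List.pyRange 0 (l.length : Int) 1)

-- ===== PRECONDITION & SPEC =====
def Spec_check_palindrome_or_not (input_str : String) (out : Int) : Prop := out = check_palindrome_or_not_alt input_str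
instance (input_str : String) (out : Int) : Decidable (Spec_check_palindrome_or_not input_str out) := by unfold Spec_check_palindrome_or_not; infer_instance

-- ===== CLAIM (what is proved, stated in full; the proofs are below) =====
def Claim_equal_check_palindrome_or_not : Prop := ∀ (input_str : String), Dom_check_palindrome_or_not input_str → Spec_check_palindrome_or_not input_str (check_palindrome_or_not input_str)

-- ===== LEMMAS AND PROOFS =====

-- total indexing used only in the proofs
def pvAt (l : List Char) (m : Nat) : Char := l.getD m ' '

lemma pvAt_eq (l : List Char) (m : Nat) (h : m < l.length) : pvAt l m = l[m] :=
  List.getD_eq_getElem l ' ' h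

lemma pvAt_eraseIdx (l : List Char) (k m : Nat) (hk : k < l.length) (hm : m < l.length - 1) :
    pvAt (l.eraseIdx k) m = if m < k then pvAt l m else pvAt l (m + 1) := by
  have hlen : (l.eraseIdx k).length = l.length - 1 := List.length_eraseIdx_of_lt hk
  have hm' : m < (l.eraseIdx k).length := by omega
  rw [pvAt_eq _ _ hm', List.getElem_eraseIdx]
  split_ifs with h
  · rw [pvAt_eq _ _ (by omega)]
  · rw [pvAt_eq _ _ (by omega)]

-- a list is its own reverse iff it is index-symmetric
lemma pvPal_iff_index (t : List Char) :
    t = t.reverse ↔ ∀ m, m < t.length → pvAt t m = pvAt t (t.length - 1 - m) := by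
  constructor
  · intro h m hm
    have h2 : t[m] = t.reverse[m]'(by simpa using hm) := by
      congr 1
    rw [pvAt_eq _ _ hm, pvAt_eq _ _ (by omega), h2,
      List.getElem_reverse (by simpa using hm)]
  · intro h
    apply List.ext_getElem (by simp)
    intro m hm hm'
    rw [List.getElem_reverse (by simpa using hm)]
    have := h m hm
    rw [pvAt_eq _ _ hm, pvAt_eq _ _ (by omega)] at this
    exact this

-- erasing any index inside a run of equal characters gives the same list
lemma pvErase_run (l : List Char) (k i : Nat) (hk : k ≤ i) (hi : i < l.length)
    (hrun : ∀ m, k ≤ m → m < i → pvAt l m = pvAt l (m + 1)) :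
    l.eraseIdx k = l.eraseIdx i := by
  apply List.ext_getElem
  · rw [List.length_eraseIdx_of_lt (by omega), List.length_eraseIdx_of_lt hi]
  · intro p hp hp'
    have hlen : (l.eraseIdx k).length = l.length - 1 := List.length_eraseIdx_of_lt (by omega)
    rw [List.getElem_eraseIdx, List.getElem_eraseIdx]
    split_ifs with h1 h2 h2
    · rfl
    · omega
    · -- k ≤ p < i : left is l[p+1], right is l[p]
      have : pvAt l p = pvAt l (p + 1) := hrun p (by omega) (by omega)
      rw [pvAt_eq _ _ (by omega), pvAt_eq _ _ (by omega)] at this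
      exact this.symm
    · rfl

-- the key combinatorial fact: if some single deletion of a non-palindrome yields a
-- palindrome, then deleting at the first mismatch pair (i, n-1-i) does too
lemma pvDeletion_reduce (l : List Char) (i : Nat) (hij : 2 * i + 1 < l.length)
    (hpre : ∀ m, m < i → pvAt l m = pvAt l (l.length - 1 - m))
    (hmis : pvAt l i ≠ pvAt l (l.length - 1 - i))
    (k : Nat) (hk : k < l.length)
    (hpal : l.eraseIdx k = (l.eraseIdx k).reverse) :
    l.eraseIdx i = (l.eraseIdx i).reverse ∨
      l.eraseIdx (l.length - 1 - i) = (l.eraseIdx (l.length - 1 - i)).reverse := by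
  set n := l.length with hn
  set j := n - 1 - i with hj
  have hlen : (l.eraseIdx k).length = n - 1 := List.length_eraseIdx_of_lt hk
  have H := (pvPal_iff_index _).mp hpal
  rw [hlen] at H
  have Hat : ∀ m, m < n - 1 → pvAt (l.eraseIdx k) m = if m < k then pvAt l m else pvAt l (m + 1) :=
    fun m hm => pvAt_eraseIdx l k m hk hm
  rcases lt_trichotomy k i with hki | hki | hki
  · -- k < i : a run of equal characters joins k to i
    left
    rw [← pvErase_run l k i (by omega) (by omega) ?_]
    · exact hpal
    · intro m hkm hmi
      have h1 := H m (by omega)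
      rw [Hat m (by omega), Hat (n - 1 - 1 - m) (by omega)] at h1
      rw [if_neg (by omega), if_neg (by omega)] at h1
      have h2 : n - 1 - 1 - m + 1 = n - 1 - m := by omega
      rw [h2] at h1
      have h3 := hpre m (by omega)
      rw [h3, h1]
  · -- k = i
    left; rw [← hki]; exact hpal
  · rcases lt_trichotomy k j with hkj | hkj | hkj
    · -- i < k < j : the mismatch pair survives the deletion, contradiction
      exfalso
      have h1 := H i (by omega)
      rw [Hat i (by omega), Hat (n - 1 - 1 - i) (by omega)] at h1
      rw [if_pos hki, if_neg (by omega)] at h1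
      have h2 : n - 1 - 1 - i + 1 = n - 1 - i := by omega
      rw [h2] at h1
      exact hmis h1
    · -- k = j
      right; rw [← hkj]; exact hpal
    · -- j < k : a run of equal characters joins j to k
      right
      rw [pvErase_run l j k (by omega) hk ?_]
      · exact hpal
      · intro m hjm hmk
        have h1 := H (n - 2 - m) (by omega)
        rw [Hat (n - 2 - m) (by omega), Hat (n - 1 - 1 - (n - 2 - m)) (by omega)] at h1
        rw [if_pos (by omega), if_pos (by omega)] at h1
        have h2 : n - 1 - 1 - (n - 2 - m) = m := by omega
        rw [h2] at h1
        have h3 := hpre (n - 2 - m) (by omega)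
        have h4 : n - 1 - (n - 2 - m) = m + 1 := by omega
        rw [h4] at h3
        rw [← h1, h3]

-- the segment s[a..b] (both ends included), as A's helper scans it
def pvSeg (l : List Char) (a b : Nat) : List Char := (l.drop a).take (b + 1 - a)

lemma pvSeg_decomp (l : List Char) (a b : Nat) (hab : a < b) (hb : b < l.length) :
    pvSeg l a b = l[a] :: (pvSeg l (a + 1) (b - 1) ++ [l[b]]) := by
  unfold pvSeg
  rw [List.drop_eq_getElem_cons (show a < l.length by omega)]
  have h1 : b + 1 - a = (b - a - 1 + 1) + 1 := by omega
  rw [h1, List.take_succ_cons]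
  congr 1
  rw [List.take_add_one]
  have h2 : b - 1 + 1 - (a + 1) = b - a - 1 := by omega
  have hidx : (l.drop (a + 1))[b - a - 1]? = some l[b] := by
    rw [List.getElem?_drop, show a + 1 + (b - a - 1) = b by omega,
      List.getElem?_eq_getElem hb]
  rw [h2, hidx]
  simp

lemma pvRev_cons_concat_iff (x y : Char) (m : List Char) :
    (x :: (m ++ [y])) = (x :: (m ++ [y])).reverse ↔ (x = y ∧ m = m.reverse) := by
  have hrev : (x :: (m ++ [y])).reverse = y :: (m.reverse ++ [x]) := by simp
  rw [hrev]
  constructor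
  · rintro h
    rw [List.cons_eq_cons] at h
    obtain ⟨hxy, h2⟩ := h
    subst hxy
    exact ⟨rfl, List.append_cancel_right h2⟩
  · rintro ⟨hxy, hm⟩
    subst hxy
    rw [List.cons_eq_cons]
    exact ⟨rfl, by rw [← hm]⟩

-- a palindromic frame can be peeled off
lemma pvPal_sandwich (p m : List Char) :
    (p ++ m ++ p.reverse) = (p ++ m ++ p.reverse).reverse ↔ m = m.reverse := by
  induction p with
  | nil => simp
  | cons x q IH =>
    have h1 : (x :: q) ++ m ++ (x :: q).reverse = x :: ((q ++ m ++ q.reverse) ++ [x]) := by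
      simp
    rw [h1, pvRev_cons_concat_iff, IH]
    simp

-- A's two-pointer scan decides exactly "the segment equals its own reverse"
lemma pvIsPalAux_iff (l : List Char) (i j : Int) (h0 : 0 ≤ i) (hij : i ≤ j + 1)
    (hj : j < (l.length : Int)) :
    pvIsPalAux l i j = true ↔ pvSeg l i.toNat j.toNat = (pvSeg l i.toNat j.toNat).reverse := by
  generalize hfuel : (j + 1 - i).toNat = fuel
  induction fuel using Nat.strong_induction_on generalizing i j with
  | _ fuel IH =>
    by_cases hlt : i < j
    · have hi' : i.toNat < l.length := by omega
      have hj' : j.toNat < l.length := by omega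
      have hgi := PySem.List.pyGet?_eq_some_getElem l h0 (by omega : i < (l.length : Int))
      have hgj := PySem.List.pyGet?_eq_some_getElem l (by omega : (0:Int) ≤ j) hj
      rw [pvIsPalAux, if_pos hlt, hgi, hgj]
      have hseg := pvSeg_decomp l i.toNat j.toNat (by omega) hj'
      have htn : (i + 1).toNat = i.toNat + 1 := by omega
      have htn' : (j - 1).toNat = j.toNat - 1 := by omega
      rw [hseg, pvRev_cons_concat_iff]
      by_cases hc : l[i.toNat] = l[j.toNat]
      · have := IH (j - 1 + 1 - (i + 1)).toNat (by omega) (i + 1) (j - 1)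
          (by omega) (by omega) (by omega) rfl
        rw [htn, htn'] at this
        simp [hc, this]
      · simp [hc]
    · rw [pvIsPalAux, if_neg hlt]
      have : pvSeg l i.toNat j.toNat = (pvSeg l i.toNat j.toNat).reverse := by
        unfold pvSeg
        have hk1 : j.toNat + 1 - i.toNat ≤ 1 := by omega
        by_cases hji : j.toNat + 1 - i.toNat = 0
        · simp [hji]
        · have h1 : j.toNat + 1 - i.toNat = 1 := by omega
          rw [h1]
          generalize l.drop i.toNat = t
          rcases t with _ | ⟨c, rest⟩ <;> simp
      exact iff_of_true rfl this

-- the mismatch point of A's main loop, as a function (proof-side helper)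
def pvFindMismatch (s : List Char) (i j : Int) : Int × Int :=
  if i < j then
    match PySem.List.pyGet? s i, PySem.List.pyGet? s j with
    | some a, some b => if a = b then pvFindMismatch s (i + 1) (j - 1) else (i, j)
    | _, _ => (i, j)
  else (i, j)
termination_by (j - i).toNat
decreasing_by omega

-- properties of the mismatch point when the scanned segment is not a palindrome
lemma pvFindMismatch_spec (l : List Char) (i j : Int) (h0 : 0 ≤ i) (hj : j < (l.length : Int))
    (hsum : i + j = (l.length : Int) - 1)
    (hpre : ∀ m : Nat, m < i.toNat → pvAt l m = pvAt l (l.length - 1 - m))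
    (hnp : pvIsPalAux l i j = false) :
    i ≤ (pvFindMismatch l i j).1 ∧ (pvFindMismatch l i j).1 < (pvFindMismatch l i j).2 ∧
    (pvFindMismatch l i j).1 + (pvFindMismatch l i j).2 = (l.length : Int) - 1 ∧
    (∀ m : Nat, m < (pvFindMismatch l i j).1.toNat →
      pvAt l m = pvAt l (l.length - 1 - m)) ∧
    pvAt l (pvFindMismatch l i j).1.toNat ≠ pvAt l (pvFindMismatch l i j).2.toNat := by
  generalize hfuel : (j - i).toNat = fuel
  induction fuel using Nat.strong_induction_on generalizing i j with
  | _ fuel IH =>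
    by_cases hlt : i < j
    · have hi' : i.toNat < l.length := by omega
      have hj' : j.toNat < l.length := by omega
      have hgi := PySem.List.pyGet?_eq_some_getElem l h0 (by omega : i < (l.length : Int))
      have hgj := PySem.List.pyGet?_eq_some_getElem l (by omega : (0:Int) ≤ j) hj
      rw [pvIsPalAux, if_pos hlt, hgi, hgj] at hnp
      rw [pvFindMismatch, if_pos hlt, hgi, hgj]
      by_cases hc : l[i.toNat]'hi' = l[j.toNat]'hj'
      · simp only [hc, if_true]
        simp only [hc, ne_eq, not_true_eq_false, if_false] at hnp
        have hpre' : ∀ m : Nat, m < (i + 1).toNat → pvAt l m = pvAt l (l.length - 1 - m) := by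
          intro m hm
          by_cases hmi : m < i.toNat
          · exact hpre m hmi
          · have hmm : m = i.toNat := by omega
            subst hmm
            have hji : j.toNat = l.length - 1 - i.toNat := by omega
            rw [pvAt_eq _ _ hi', ← hji, pvAt_eq _ _ hj']
            exact hc
        have := IH (j - 1 - (i + 1)).toNat (by omega) (i + 1) (j - 1)
          (by omega) (by omega) (by omega) hpre' hnp rfl
        exact ⟨by omega, this.2⟩
      · simp only [hc, if_false]
        refine ⟨le_refl i, hlt, hsum, hpre, ?_⟩
        rw [pvAt_eq _ _ hi', pvAt_eq _ _ hj']
        exact hc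
    · rw [pvIsPalAux, if_neg hlt] at hnp
      exact absurd hnp (by simp)

-- A's main loop, expressed through the mismatch point
lemma pvCheckLoop_eq (l : List Char) (i j : Int) (h0 : 0 ≤ i) (hj : j < (l.length : Int)) :
    pvCheckLoop l i j =
      if pvIsPalAux l i j then 0
      else
        if pvIsPalAux l ((pvFindMismatch l i j).1 + 1) (pvFindMismatch l i j).2 ||
            pvIsPalAux l (pvFindMismatch l i j).1 ((pvFindMismatch l i j).2 - 1) then 1 else 2 := by
  generalize hfuel : (j - i).toNat = fuel
  induction fuel using Nat.strong_induction_on generalizing i j with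
  | _ fuel IH =>
    by_cases hlt : i < j
    · have hgi := PySem.List.pyGet?_eq_some_getElem l h0 (by omega : i < (l.length : Int))
      have hgj := PySem.List.pyGet?_eq_some_getElem l (by omega : (0:Int) ≤ j) hj
      have eC : pvCheckLoop l i j =
          (if l[i.toNat]'(by omega) = l[j.toNat]'(by omega) then pvCheckLoop l (i + 1) (j - 1)
           else if pvIsPalAux l (i + 1) j || pvIsPalAux l i (j - 1) then 1 else 2) := by
        rw [pvCheckLoop, if_pos hlt, hgi, hgj]
      have eF : pvFindMismatch l i j =
          (if l[i.toNat]'(by omega) = l[j.toNat]'(by omega) then pvFindMismatch l (i + 1) (j - 1)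
           else (i, j)) := by
        rw [pvFindMismatch, if_pos hlt, hgi, hgj]
      have eP : pvIsPalAux l i j =
          (if l[i.toNat]'(by omega) ≠ l[j.toNat]'(by omega) then false
           else pvIsPalAux l (i + 1) (j - 1)) := by
        rw [pvIsPalAux, if_pos hlt, hgi, hgj]
      by_cases hc : l[i.toNat]'(by omega) = l[j.toNat]'(by omega)
      · rw [eC, eF, eP]
        simp only [hc, ne_eq, not_true_eq_false, if_false, if_true]
        exact IH (j - 1 - (i + 1)).toNat (by omega) (i + 1) (j - 1) (by omega) (by omega) rfl
      · rw [eC, eF, eP]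
        simp [hc]
    · have : pvIsPalAux l i j = true := by rw [pvIsPalAux, if_neg hlt]
      rw [pvCheckLoop, if_neg hlt, this]
      simp

-- the full string is the segment [0, n-1]
lemma pvSeg_full (l : List Char) : pvSeg l 0 (l.length - 1) = l := by
  unfold pvSeg
  rcases l with _ | ⟨c, rest⟩
  · simp
  · simp [List.take_of_length_le]

-- under the matched-prefix property, the suffix after the mismatch pair is the reversed prefix
lemma pvDrop_suffix_rev (l : List Char) (i : Nat) (hij : 2 * i + 1 ≤ l.length)
    (hpre : ∀ m, m < i → pvAt l m = pvAt l (l.length - 1 - m)) :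
    l.drop (l.length - i) = (l.take i).reverse := by
  apply List.ext_getElem
  · simp; omega
  · intro m hm hm2
    have hmi : m < i := by simp at hm; omega
    rw [List.getElem_drop, List.getElem_reverse, List.getElem_take]
    rw [← pvAt_eq l _ (by omega), ← pvAt_eq l _ (by simp at hm2 ⊢; omega)]
    calc pvAt l (l.length - i + m)
        = pvAt l (l.length - 1 - (i - 1 - m)) := by congr 1; omega
      _ = pvAt l (i - 1 - m) := (hpre (i - 1 - m) (by omega)).symm
      _ = pvAt l ((List.take i l).length - 1 - m) := by
            congr 1; rw [List.length_take]; omega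

-- deleting at the left of the mismatch pair is equivalent to A's first segment check
lemma pvErase_left_iff (l : List Char) (i : Nat) (hij : 2 * i + 1 < l.length)
    (hpre : ∀ m, m < i → pvAt l m = pvAt l (l.length - 1 - m)) :
    (l.eraseIdx i = (l.eraseIdx i).reverse ↔
      pvSeg l (i + 1) (l.length - 1 - i) = (pvSeg l (i + 1) (l.length - 1 - i)).reverse) := by
  have hseg : l.eraseIdx i =
      l.take i ++ pvSeg l (i + 1) (l.length - 1 - i) ++ (l.take i).reverse := by
    rw [List.eraseIdx_eq_take_drop_succ, List.append_assoc]
    congr 1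
    have h1 : pvSeg l (i + 1) (l.length - 1 - i) =
        (l.drop (i + 1)).take (l.length - 1 - i - i) := by
      unfold pvSeg; congr 1; omega
    have h2 : l.drop (l.length - i) = (l.drop (i + 1)).drop (l.length - 1 - i - i) := by
      rw [List.drop_drop]; congr 1; omega
    rw [h1, ← pvDrop_suffix_rev l i (by omega) hpre, h2, List.take_append_drop]
  rw [hseg, pvPal_sandwich]

-- deleting at the right of the mismatch pair is equivalent to A's second segment check
lemma pvErase_right_iff (l : List Char) (i : Nat) (hij : 2 * i + 1 < l.length)
    (hpre : ∀ m, m < i → pvAt l m = pvAt l (l.length - 1 - m)) :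
    (l.eraseIdx (l.length - 1 - i) = (l.eraseIdx (l.length - 1 - i)).reverse ↔
      pvSeg l i (l.length - 1 - i - 1) = (pvSeg l i (l.length - 1 - i - 1)).reverse) := by
  have hseg : l.eraseIdx (l.length - 1 - i) =
      l.take i ++ pvSeg l i (l.length - 1 - i - 1) ++ (l.take i).reverse := by
    rw [List.eraseIdx_eq_take_drop_succ]
    have h1 : l.take (l.length - 1 - i) = l.take i ++ (l.drop i).take (l.length - 1 - i - i) := by
      rw [← List.take_add]; congr 1; omega
    have h2 : pvSeg l i (l.length - 1 - i - 1) = (l.drop i).take (l.length - 1 - i - i) := by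
      unfold pvSeg; congr 1; omega
    have h3 : l.drop (l.length - 1 - i + 1) = (l.take i).reverse := by
      rw [show l.length - 1 - i + 1 = l.length - i from by omega]
      exact pvDrop_suffix_rev l i (by omega) hpre
    rw [h1, h2, h3]
  rw [hseg, pvPal_sandwich]

-- B's loop returns 1 exactly when some single deletion yields a palindrome
lemma pvTryDeletions_eq (l : List Char) (ks : List Int) :
    pvTryDeletions l ks =
      if ∃ k ∈ ks, (PySem.List.slice l none (some k) ++ PySem.List.slice l (some (k + 1)) none) =
          (PySem.List.slice l none (some k) ++ PySem.List.slice l (some (k + 1)) none).reverse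
      then 1 else 2 := by
  induction ks with
  | nil => simp [pvTryDeletions]
  | cons k rest IH =>
    simp only [pvTryDeletions]
    by_cases h : (PySem.List.slice l none (some k) ++ PySem.List.slice l (some (k + 1)) none) =
        (PySem.List.slice l none (some k) ++ PySem.List.slice l (some (k + 1)) none).reverse
    · rw [if_pos h, if_pos ⟨k, List.mem_cons_self, h⟩]
    · rw [if_neg h, IH]
      by_cases h2 : ∃ x ∈ rest,
          (PySem.List.slice l none (some x) ++ PySem.List.slice l (some (x + 1)) none) =
          (PySem.List.slice l none (some x) ++ PySem.List.slice l (some (x + 1)) none).reverse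
      · obtain ⟨x, hx, hpx⟩ := h2
        rw [if_pos ⟨x, hx, hpx⟩, if_pos ⟨x, List.mem_cons_of_mem _ hx, hpx⟩]
      · rw [if_neg h2, if_neg ?_]
        rintro ⟨x, hx, hpx⟩
        rcases List.mem_cons.mp hx with rfl | hx'
        · exact h hpx
        · exact h2 ⟨x, hx', hpx⟩

-- for an in-range k, the two slices of B are exactly the deletion at k
lemma pvSlice_eraseIdx (l : List Char) (k : Int) (h0 : 0 ≤ k) (_hk : k < (l.length : Int)) :
    PySem.List.slice l none (some k) ++ PySem.List.slice l (some (k + 1)) none =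
      l.eraseIdx k.toNat := by
  rw [PySem.List.slice_to l h0, PySem.List.slice_from l (by omega),
    List.eraseIdx_eq_take_drop_succ]
  congr 2
  omega

-- ===== VERDICT (by name: the statement is the Claim_ definition above) =====
theorem check_palindrome_or_not_spec : Claim_equal_check_palindrome_or_not := by
  intro input_str _
  unfold Spec_check_palindrome_or_not
  have ha : check_palindrome_or_not input_str =
      pvCheckLoop input_str.toList 0 ((input_str.toList.length : Int) - 1) := by
    unfold check_palindrome_or_not
    rw [PySem.Str.len_eq]
  rw [ha]
  unfold check_palindrome_or_not_alt
  generalize input_str.toList = l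
  have hloop := pvCheckLoop_eq l 0 ((l.length : Int) - 1) (by omega) (by omega)
  have hfull := pvIsPalAux_iff l 0 ((l.length : Int) - 1) (by omega) (by omega) (by omega)
  rw [show ((0 : Int)).toNat = 0 from rfl, show (((l.length : Int) - 1)).toNat = l.length - 1 from by omega,
    pvSeg_full] at hfull
  by_cases hpal : l = l.reverse
  · rw [hloop, if_pos (hfull.mpr hpal), if_pos hpal]
  · have hnp : pvIsPalAux l 0 ((l.length : Int) - 1) = false := by
      cases h : pvIsPalAux l 0 ((l.length : Int) - 1)
      · rfl
      · exact absurd (hfull.mp h) hpal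
    simp only [if_neg hpal]
    rw [hloop, if_neg (by simp [hnp]), pvTryDeletions_eq]
    -- the mismatch point and its properties
    obtain ⟨hge, hlt, hsum, hpre, hmis⟩ :=
      pvFindMismatch_spec l 0 ((l.length : Int) - 1) (by omega) (by omega) (by omega)
        (by intro m hm; simp at hm) hnp
    set P := pvFindMismatch l 0 ((l.length : Int) - 1) with hP
    set I := P.1.toNat with hI
    have h2i : 2 * I + 1 < l.length := by omega
    have hJ : P.2.toNat = l.length - 1 - I := by omega
    have hpreN : ∀ m, m < I → pvAt l m = pvAt l (l.length - 1 - m) := hpre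
    -- A's two segment checks, as deletion conditions
    have hA1 : pvIsPalAux l (P.1 + 1) P.2 = true ↔
        l.eraseIdx I = (l.eraseIdx I).reverse := by
      rw [pvIsPalAux_iff l (P.1 + 1) P.2 (by omega) (by omega) (by omega),
        show (P.1 + 1).toNat = I + 1 from by omega, hJ,
        pvErase_left_iff l I h2i hpreN]
    have hA2 : pvIsPalAux l P.1 (P.2 - 1) = true ↔
        l.eraseIdx (l.length - 1 - I) = (l.eraseIdx (l.length - 1 - I)).reverse := by
      rw [pvIsPalAux_iff l P.1 (P.2 - 1) (by omega) (by omega) (by omega),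
        show (P.1).toNat = I from rfl, show (P.2 - 1).toNat = l.length - 1 - I - 1 from by omega,
        pvErase_right_iff l I h2i hpreN]
    -- B's exists, as a deletion condition over Nat indices
    have hB : (∃ k ∈ PySem.List.pyRange 0 (l.length : Int) 1,
        (PySem.List.slice l none (some k) ++ PySem.List.slice l (some (k + 1)) none) =
        (PySem.List.slice l none (some k) ++ PySem.List.slice l (some (k + 1)) none).reverse) ↔
        ∃ m : Nat, m < l.length ∧ l.eraseIdx m = (l.eraseIdx m).reverse := by
      constructor
      · rintro ⟨k, hk, h⟩
        rw [PySem.List.mem_pyRange_one] at hk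
        rw [pvSlice_eraseIdx l k hk.1 hk.2] at h
        exact ⟨k.toNat, by omega, h⟩
      · rintro ⟨m, hm, h⟩
        refine ⟨(m : Int), PySem.List.mem_pyRange_one.mpr ⟨by omega, by omega⟩, ?_⟩
        rw [pvSlice_eraseIdx l (m : Int) (by omega) (by omega)]
        simpa using h
    by_cases hC : l.eraseIdx I = (l.eraseIdx I).reverse ∨
        l.eraseIdx (l.length - 1 - I) = (l.eraseIdx (l.length - 1 - I)).reverse
    · have hAcond : (pvIsPalAux l (P.1 + 1) P.2 || pvIsPalAux l P.1 (P.2 - 1)) = true := by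
        rcases hC with h | h
        · rw [hA1.mpr h]; simp
        · rw [hA2.mpr h]; simp
      have hBcond : ∃ m : Nat, m < l.length ∧ l.eraseIdx m = (l.eraseIdx m).reverse := by
        rcases hC with h | h
        · exact ⟨I, by omega, h⟩
        · exact ⟨l.length - 1 - I, by omega, h⟩
      rw [if_pos hAcond, if_pos (hB.mpr hBcond)]
    · have hAcond : (pvIsPalAux l (P.1 + 1) P.2 || pvIsPalAux l P.1 (P.2 - 1)) = false := by
        cases h1 : pvIsPalAux l (P.1 + 1) P.2
        · cases h2 : pvIsPalAux l P.1 (P.2 - 1)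
          · rfl
          · exact absurd (Or.inr (hA2.mp h2)) hC
        · exact absurd (Or.inl (hA1.mp h1)) hC
      have hBcond : ¬ ∃ m : Nat, m < l.length ∧ l.eraseIdx m = (l.eraseIdx m).reverse := by
        rintro ⟨m, hm, h⟩
        have hmisN : pvAt l I ≠ pvAt l (l.length - 1 - I) := by
          rw [← hJ]; exact hmis
        exact hC (pvDeletion_reduce l I h2i hpreN hmisN m hm h)
      rw [if_neg (by simp [hAcond]), if_neg (fun h => hBcond (hB.mp h))]
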